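-- pv_equiv track=rewrite | github.com/Darelife/CompetitiveProgramming | Problems/coreAssignment/main.py | find_best_threshold
-- ===== SOURCE A (Python) =====
-- def is_valid_threshold(arr, D, candidate):
--     """
--     Check if there is at least one contiguous subarray of length D
--     in which every element is >= candidate.
--     """
--     count = 0
--     for num in arr:
--         if num >= candidate:
--             count += 1
--         else:
--             count = 0
--         if count >= D:
--             return True
--     return False
--
-- def find_best_threshold(arr, D):
--     """
--     Use binary search over the range [0, max(arr)] to find the maximum x
--     such that there is a contiguous subarray of length D with all elements >= x.
--     """
--     lo = 0
--     hi = max(arr)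
--     best = 0
--     while lo <= hi:
--         mid = (lo + hi) // 2
--         if is_valid_threshold(arr, D, mid):
--             best = mid
--             lo = mid + 1
--         else:
--             hi = mid - 1
--     return best
-- ===== SOURCE B (Python) =====
-- def find_best_threshold(arr, D):
--     """
--     Directly scan every window of length D, take the minimum of each
--     window, and return the largest such minimum (clamped below at 0).
--     """
--     best = 0
--     for i in range(len(arr) - D + 1):
--         m = min(arr[i:i + D])
--         if m > best:
--             best = m
--     return best
-- ===== Notes on version B (the rewrite author's own statement) =====
-- stated objective: alternative
-- what changed: Replaces binary search over the answer range with a validity-counting scan per probe by one direct scan over all length-D windows taking the max of each window's minimum.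
-- outside the precondition, e.g. on find_best_threshold([5], 0): A returns 5, B raises ValueError; on find_best_threshold([], 1): A raises ValueError, B returns 0
import Mathlib
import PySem

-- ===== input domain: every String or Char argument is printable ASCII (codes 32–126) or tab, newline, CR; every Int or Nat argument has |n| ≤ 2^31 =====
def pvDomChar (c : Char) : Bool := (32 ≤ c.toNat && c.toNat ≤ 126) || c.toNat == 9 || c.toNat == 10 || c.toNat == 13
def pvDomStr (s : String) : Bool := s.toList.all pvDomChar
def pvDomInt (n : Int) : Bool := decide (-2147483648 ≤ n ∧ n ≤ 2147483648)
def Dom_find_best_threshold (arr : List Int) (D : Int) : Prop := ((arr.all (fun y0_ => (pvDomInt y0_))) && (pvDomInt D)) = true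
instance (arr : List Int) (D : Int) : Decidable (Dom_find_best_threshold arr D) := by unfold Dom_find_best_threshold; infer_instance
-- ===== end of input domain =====

-- B replaces A's binary search over the answer (with a run-count validity scan per probe)
-- by one direct scan over all length-D windows, returning the largest window minimum clamped at 0
-- (objective: alternative algorithm, not claimed faster).

-- ===== PORT A =====
def is_valid_loop (D cand : Int) : List Int → Int → Bool
  | [], _ => false
  | num :: rest, count =>
      let count' := if cand ≤ num then count + 1 else 0
      if D ≤ count' then true else is_valid_loop D cand rest count'

def is_valid_threshold (arr : List Int) (D cand : Int) : Bool :=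
  is_valid_loop D cand arr 0

def fbt_loop (arr : List Int) (D lo hi best : Int) : Int :=
  if h : lo ≤ hi then
    let mid := PySem.Int.floordiv (lo + hi) 2
    if is_valid_threshold arr D mid then fbt_loop arr D (mid + 1) hi mid
    else fbt_loop arr D lo (mid - 1) best
  else best
termination_by (hi + 1 - lo).toNat
decreasing_by
  · have hb := PySem.Int.floordiv_two_mid_bounds h; omega
  · have hb := PySem.Int.floordiv_two_mid_bounds h; omega

-- max(arr) raises on the empty list; Pre_ excludes it, so getD's default is never used
def find_best_threshold (arr : List Int) (D : Int) : Int :=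
  fbt_loop arr D 0 ((PySem.List.max? arr (fun x => x)).getD 0) 0

-- ===== PORT B =====
-- min() of an empty slice raises; Pre_ (1 ≤ D) keeps every slice nonempty, so getD's default is never used
def find_best_threshold_alt (arr : List Int) (D : Int) : Int :=
  (PySem.List.pyRange 0 ((arr.length : Int) - D + 1) 1).foldl
    (fun best i =>
      let m := (PySem.List.min? (PySem.List.slice arr (some i) (some (i + D))) (fun x => x)).getD 0
      if m > best then m else best) 0

-- ===== PRECONDITION & SPEC =====
-- Pre_ excludes the empty list, on which A raises ValueError (max of an empty sequence),
-- and D ≤ 0, a degenerate window length on which B itself raises (min of an empty slice)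
-- while A's count >= D test fires immediately.
def Pre_find_best_threshold (arr : List Int) (D : Int) : Prop := arr ≠ [] ∧ 1 ≤ D
instance (arr : List Int) (D : Int) : Decidable (Pre_find_best_threshold arr D) := by
  unfold Pre_find_best_threshold; infer_instance

def pvWitness_find_best_threshold : List Int × Int := ([3, 1, 2], 2)

def Spec_find_best_threshold (arr : List Int) (D : Int) (out : Int) : Prop := out = find_best_threshold_alt arr D
instance (arr : List Int) (D : Int) (out : Int) : Decidable (Spec_find_best_threshold arr D out) := by unfold Spec_find_best_threshold; infer_instance

-- ===== CLAIM (what is proved, stated in full; the proofs are below) =====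
def Claim_equal_find_best_threshold : Prop := ∀ (arr : List Int) (D : Int), Dom_find_best_threshold arr D → Pre_find_best_threshold arr D → Spec_find_best_threshold arr D (find_best_threshold arr D)

-- ===== LEMMAS AND PROOFS =====

-- A's inner loop: count carries the length of the current run of elements ≥ cand.
lemma ivt_loop_char (D c : Int) (hD : 1 ≤ D) :
    ∀ (l : List Int) (count : Int), 0 ≤ count → count < D →
      (is_valid_loop D c l count = true ↔
        (∃ j : ℕ, j ≤ l.length ∧ (∀ a ∈ l.take j, c ≤ a) ∧ D ≤ count + j) ∨
        (∃ i : ℕ, i + D.toNat ≤ l.length ∧ ∀ a ∈ (l.drop i).take D.toNat, c ≤ a)) := by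
  have hdd : (D.toNat : Int) = D := Int.toNat_of_nonneg (by omega)
  have hd1 : 1 ≤ D.toNat := by omega
  intro l
  induction l with
  | nil =>
      intro count h0 hlt
      simp only [is_valid_loop, List.length_nil]
      constructor
      · intro h; cases h
      · rintro (⟨j, hj, _, hDj⟩ | ⟨i, hi, _⟩) <;> omega
  | cons num rest ih =>
      intro count h0 hlt
      by_cases hnum : c ≤ num
      · by_cases hstop : D ≤ count + 1
        · have hlhs : is_valid_loop D c (num :: rest) count = true := by
            simp only [is_valid_loop, hnum, if_true, hstop]
          rw [hlhs]
          simp only [true_iff]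
          left
          refine ⟨1, by simp, ?_, by omega⟩
          intro a ha
          simp only [List.take_succ_cons, List.take_zero, List.mem_singleton] at ha
          omega
        · have hlhs : is_valid_loop D c (num :: rest) count = is_valid_loop D c rest (count + 1) := by
            simp only [is_valid_loop, hnum, if_true, hstop, if_false]
          rw [hlhs, ih (count + 1) (by omega) (by omega)]
          constructor
          · rintro (⟨j, hj, hall, hDj⟩ | ⟨i, hi, hall⟩)
            · left
              refine ⟨j + 1, by simp; omega, ?_, by omega⟩
              intro a ha
              rw [List.take_succ_cons] at ha
              rcases List.mem_cons.mp ha with h | h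
              · omega
              · exact hall a h
            · right
              exact ⟨i + 1, by simp; omega, by rwa [List.drop_succ_cons]⟩
          · rintro (⟨j, hj, hall, hDj⟩ | ⟨i, hi, hall⟩)
            · match j, hj, hDj with
              | 0, hj, hDj => omega
              | j' + 1, hj, hDj =>
                  left
                  refine ⟨j', by simp at hj; omega, ?_, by omega⟩
                  intro a ha
                  exact hall a (by rw [List.take_succ_cons]; exact List.mem_cons_of_mem _ ha)
            · match i, hi, hall with
              | 0, hi, hall =>
                  left
                  refine ⟨D.toNat - 1, by simp at hi ⊢; omega, ?_, by omega⟩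
                  intro a ha
                  refine hall a ?_
                  rw [List.drop_zero]
                  have hDsucc : D.toNat = (D.toNat - 1) + 1 := by omega
                  rw [hDsucc, List.take_succ_cons]
                  exact List.mem_cons_of_mem _ ha
              | i' + 1, hi, hall =>
                  right
                  exact ⟨i', by simp at hi; omega, by rwa [List.drop_succ_cons] at hall⟩
      · have hc0 : ¬ D ≤ (0 : Int) := by omega
        have hlhs : is_valid_loop D c (num :: rest) count = is_valid_loop D c rest 0 := by
          simp only [is_valid_loop, hnum, if_false, hc0]
        rw [hlhs, ih 0 le_rfl (by omega)]
        constructor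
        · rintro (⟨j, hj, hall, hDj⟩ | ⟨i, hi, hall⟩)
          · right
            refine ⟨0 + 1, by simp; omega, ?_⟩
            rw [List.drop_succ_cons, List.drop_zero]
            intro a ha
            have hsub : rest.take D.toNat = (rest.take j).take D.toNat := by
              rw [List.take_take]; congr 1; omega
            rw [hsub] at ha
            exact hall a (List.mem_of_mem_take ha)
          · right
            exact ⟨i + 1, by simp at hi ⊢; omega, by rwa [List.drop_succ_cons]⟩
        · rintro (⟨j, hj, hall, hDj⟩ | ⟨i, hi, hall⟩)
          · match j, hj, hDj with
            | 0, hj, hDj => omega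
            | j' + 1, hj, hDj =>
                exact absurd (hall num (by rw [List.take_succ_cons]; exact List.mem_cons_self ..)) hnum
          · match i, hi, hall with
            | 0, hi, hall =>
                have : c ≤ num := by
                  refine hall num ?_
                  rw [List.drop_zero]
                  have hDsucc : D.toNat = (D.toNat - 1) + 1 := by omega
                  rw [hDsucc, List.take_succ_cons]
                  exact List.mem_cons_self ..
                exact absurd this hnum
            | i' + 1, hi, hall =>
                right
                exact ⟨i', by simp at hi; omega, by rwa [List.drop_succ_cons] at hall⟩

-- A's validity test = "some contiguous window of length D is elementwise ≥ c".
lemma valid_char (arr : List Int) (D c : Int) (hD : 1 ≤ D) :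
    is_valid_threshold arr D c = true ↔
      ∃ i : ℕ, i + D.toNat ≤ arr.length ∧ ∀ a ∈ (arr.drop i).take D.toNat, c ≤ a := by
  rw [is_valid_threshold, ivt_loop_char D c hD arr 0 le_rfl (by omega)]
  constructor
  · rintro (⟨j, hj, hall, hDj⟩ | h)
    · refine ⟨0, by omega, ?_⟩
      rw [List.drop_zero]
      intro a ha
      have hsub : arr.take D.toNat = (arr.take j).take D.toNat := by
        rw [List.take_take]; congr 1; omega
      rw [hsub] at ha
      exact hall a (List.mem_of_mem_take ha)
    · exact h
  · intro h
    exact Or.inr h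

-- A's binary search, characterised: when validity is "x ≤ W" on [lo,hi], it returns the
-- greatest valid point of [lo,hi] (= min W hi), or best if none.
lemma fbt_char (arr : List Int) (D W : Int) :
    ∀ (lo hi best : Int),
      (∀ x, lo ≤ x → x ≤ hi → (is_valid_threshold arr D x = true ↔ x ≤ W)) →
      fbt_loop arr D lo hi best = if lo ≤ hi then (if W < lo then best else min W hi) else best := by
  have main : ∀ (fuel : ℕ) (lo hi best : Int), (hi + 1 - lo).toNat ≤ fuel →
      (∀ x, lo ≤ x → x ≤ hi → (is_valid_threshold arr D x = true ↔ x ≤ W)) →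
      fbt_loop arr D lo hi best = if lo ≤ hi then (if W < lo then best else min W hi) else best := by
    intro fuel
    induction fuel with
    | zero =>
        intro lo hi best hf h
        have hlt : ¬ lo ≤ hi := by omega
        rw [fbt_loop]
        simp [hlt]
    | succ n ih =>
        intro lo hi best hf h
        rw [fbt_loop]
        by_cases hle : lo ≤ hi
        · have hmid := PySem.Int.floordiv_two_mid_bounds hle
          by_cases hv : is_valid_threshold arr D (PySem.Int.floordiv (lo + hi) 2) = true
          · have hWmid : PySem.Int.floordiv (lo + hi) 2 ≤ W := (h _ hmid.1 hmid.2).mp hv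
            have hrec := ih (PySem.Int.floordiv (lo + hi) 2 + 1) hi (PySem.Int.floordiv (lo + hi) 2)
              (by omega) (fun x hx1 hx2 => h x (by omega) hx2)
            simp only [hle, dite_true, hv, if_true]
            rw [hrec]
            simp only [min_def]
            split_ifs <;> omega
          · have hWmid : W < PySem.Int.floordiv (lo + hi) 2 := by
              by_contra hc
              exact hv ((h _ hmid.1 hmid.2).mpr (by omega))
            have hrec := ih lo (PySem.Int.floordiv (lo + hi) 2 - 1) best
              (by omega) (fun x hx1 hx2 => h x hx1 (by omega))
            simp only [hle, dite_true, hv, if_false, Bool.false_eq_true]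
            rw [hrec]
            simp only [min_def]
            split_ifs <;> omega
        · simp [hle]
  intro lo hi best h
  exact main (hi + 1 - lo).toNat lo hi best le_rfl h

lemma foldl_max_pull (t : List Int) : ∀ (a b : Int), t.foldl max (max a b) = max a (t.foldl max b) := by
  induction t with
  | nil => intro a b; rfl
  | cons c t ih =>
      intro a b
      simp only [List.foldl_cons, max_assoc, ih]

-- The list of all window minimums that B maximises over.
def pvMins (arr : List Int) (d : ℕ) : List Int :=
  (List.range (arr.length + 1 - d)).map
    (fun k => (PySem.List.min? ((arr.drop k).take d) (fun y => y)).getD 0)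

lemma win_min (arr : List Int) (d k : ℕ) (hd : 1 ≤ d) (hk : k + d ≤ arr.length) (x : Int) :
    (x ≤ (PySem.List.min? ((arr.drop k).take d) (fun y => y)).getD 0) ↔
      ∀ a ∈ (arr.drop k).take d, x ≤ a := by
  have hlen : ((arr.drop k).take d).length = min d (arr.length - k) := by simp
  have hne : (arr.drop k).take d ≠ [] := by
    intro h; rw [h] at hlen; simp at hlen; omega
  obtain ⟨m, hm⟩ : ∃ m, PySem.List.min? ((arr.drop k).take d) (fun y => y) = some m := by
    cases h : PySem.List.min? ((arr.drop k).take d) (fun y => y) with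
    | none => exact absurd (((PySem.List.min?_eq_none_iff _ _).mp h)) hne
    | some m => exact ⟨m, rfl⟩
  rw [hm, Option.getD_some]
  constructor
  · intro hx a ha; exact le_trans hx (PySem.List.min?_isMin hm a ha)
  · intro h; exact h m (PySem.List.min?_mem hm)

lemma win_min_mem_arr (arr : List Int) (d k : ℕ) (hd : 1 ≤ d) (hk : k + d ≤ arr.length) :
    (PySem.List.min? ((arr.drop k).take d) (fun y => y)).getD 0 ∈ arr := by
  have hlen : ((arr.drop k).take d).length = min d (arr.length - k) := by simp
  have hne : (arr.drop k).take d ≠ [] := by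
    intro h; rw [h] at hlen; simp at hlen; omega
  obtain ⟨m, hm⟩ : ∃ m, PySem.List.min? ((arr.drop k).take d) (fun y => y) = some m := by
    cases h : PySem.List.min? ((arr.drop k).take d) (fun y => y) with
    | none => exact absurd (((PySem.List.min?_eq_none_iff _ _).mp h)) hne
    | some m => exact ⟨m, rfl⟩
  rw [hm, Option.getD_some]
  exact List.mem_of_mem_drop (List.mem_of_mem_take (PySem.List.min?_mem hm))

-- B computes the running maximum (from 0) of the window minimums.
lemma altB (arr : List Int) (D : Int) (hD : 1 ≤ D) :
    find_best_threshold_alt arr D = (pvMins arr D.toNat).foldl max 0 := by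
  have hdd : (D.toNat : Int) = D := Int.toNat_of_nonneg (by omega)
  have hK : (((arr.length : Int)) - D + 1).toNat = arr.length + 1 - D.toNat := by omega
  rw [find_best_threshold_alt, PySem.List.pyRange_one, pvMins, List.foldl_map, List.foldl_map]
  simp only [sub_zero, zero_add, hK]
  refine List.foldl_ext _ _ _ ?_
  intro b k hk
  rw [← hdd, PySem.List.slice_natCast_add]
  simp only [Int.toNat_natCast]
  split_ifs <;> omega

-- ===== VERDICT (by name: the statement is the Claim_ definition above) =====
theorem find_best_threshold_spec : Claim_equal_find_best_threshold := by
  intro arr D _ hpre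
  obtain ⟨hne, hD⟩ := hpre
  unfold Spec_find_best_threshold
  have hdd : (D.toNat : Int) = D := Int.toNat_of_nonneg (by omega)
  obtain ⟨mx, hmx⟩ : ∃ mx, PySem.List.max? arr (fun y => y) = some mx := by
    cases h : PySem.List.max? arr (fun y => y) with
    | none => exact absurd (((PySem.List.max?_eq_none_iff _ _).mp h)) hne
    | some mx => exact ⟨mx, rfl⟩
  have hA : find_best_threshold arr D = fbt_loop arr D 0 mx 0 := by
    rw [find_best_threshold, hmx, Option.getD_some]
  rw [hA, altB arr D hD]
  by_cases hdn : D.toNat ≤ arr.length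
  · -- windows exist
    obtain ⟨m0, t, hmt⟩ : ∃ m0 t, pvMins arr D.toNat = m0 :: t := by
      have : pvMins arr D.toNat ≠ [] := by
        rw [pvMins]
        simp only [ne_eq, List.map_eq_nil_iff, List.range_eq_nil]
        omega
      exact List.exists_cons_of_ne_nil this
    have hWmax : PySem.List.max? (pvMins arr D.toNat) (fun y => y) = some (t.foldl max m0) := by
      rw [hmt]; exact PySem.List.max?_id_cons m0 t
    have hWmem : t.foldl max m0 ∈ pvMins arr D.toNat := PySem.List.max?_mem hWmax
    have hWub : ∀ y ∈ pvMins arr D.toNat, y ≤ t.foldl max m0 := by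
      intro y hy; exact PySem.List.max?_isMax hWmax y hy
    have hmem_char : ∀ y, y ∈ pvMins arr D.toNat ↔
        ∃ k : ℕ, k + D.toNat ≤ arr.length ∧
          y = (PySem.List.min? ((arr.drop k).take D.toNat) (fun z => z)).getD 0 := by
      intro y
      rw [pvMins]
      simp only [List.mem_map, List.mem_range]
      constructor
      · rintro ⟨k, hk, hy⟩; exact ⟨k, by omega, hy.symm⟩
      · rintro ⟨k, hk, hy⟩; exact ⟨k, by omega, hy.symm⟩
    have hWarr : t.foldl max m0 ≤ mx := by
      obtain ⟨k, hk, hy⟩ := (hmem_char _).mp hWmem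
      rw [hy]
      exact PySem.List.max?_isMax hmx _ (win_min_mem_arr arr D.toNat k (by omega) hk)
    have hvalid : ∀ x : Int, (is_valid_threshold arr D x = true ↔ x ≤ t.foldl max m0) := by
      intro x
      rw [valid_char arr D x hD]
      constructor
      · rintro ⟨i, hi, hall⟩
        have hx : x ≤ (PySem.List.min? ((arr.drop i).take D.toNat) (fun y => y)).getD 0 :=
          (win_min arr D.toNat i (by omega) hi x).mpr hall
        exact le_trans hx (hWub _ ((hmem_char _).mpr ⟨i, hi, rfl⟩))
      · intro hx
        obtain ⟨k, hk, hy⟩ := (hmem_char _).mp hWmem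
        refine ⟨k, hk, ?_⟩
        refine (win_min arr D.toNat k (by omega) hk x).mp ?_
        rw [← hy]; exact hx
    rw [fbt_char arr D (t.foldl max m0) 0 mx 0 (fun x _ _ => hvalid x)]
    rw [hmt, List.foldl_cons]
    rw [foldl_max_pull t 0 m0]
    simp only [min_def, max_def]
    split_ifs <;> omega
  · -- D longer than the list: no window, both sides 0
    have hmins : pvMins arr D.toNat = [] := by
      rw [pvMins]
      simp only [List.map_eq_nil_iff, List.range_eq_nil]
      omega
    have hvalid : ∀ x : Int, 0 ≤ x → x ≤ mx → (is_valid_threshold arr D x = true ↔ x ≤ -1) := by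
      intro x hx _
      rw [valid_char arr D x hD]
      constructor
      · rintro ⟨i, hi, -⟩; omega
      · intro h; omega
    rw [fbt_char arr D (-1) 0 mx 0 hvalid, hmins]
    simp only [List.foldl_nil]
    split_ifs <;> omega
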